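-- pv_equiv track=rewrite | github.com/MarcoContreras23/AutomatasProyecto1 | ventana/Metodos.py | otro
-- ===== SOURCE A (Python) =====
-- def otro(exp):
--
--     lista = []
--     start = 0
--     nivel = 0
--     cont = 0
--
--     for c in exp:
--         if c == "(":
--             nivel += 1
--         if c == ")":
--             nivel -= 1
--         if c == "|":
--             if nivel == 0:
--                 lista.append(delamba(exp[start: cont]))
--                 start = cont + 1
--         cont += 1
--     lista.append(delamba(exp[start:]))
--
--     return lista
--
-- def delamba(exp):
--
--     if exp == "λ":
--         return ""
--     else:
--         return exp
-- ===== SOURCE B (Python) =====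
-- def otro(exp):
--     # split on every bar, then merge pieces back while parens are unbalanced
--     partes = exp.split("|")
--     res = []
--     acc = partes[0]
--     bal = acc.count("(") - acc.count(")")
--     for p in partes[1:]:
--         if bal == 0:
--             res.append("" if acc == "λ" else acc)
--             acc = p
--             bal = p.count("(") - p.count(")")
--         else:
--             acc = acc + "|" + p
--             bal += p.count("(") - p.count(")")
--     res.append("" if acc == "λ" else acc)
--     return res
-- ===== Notes on version B (the rewrite author's own statement) =====
-- stated objective: faster
-- what changed: Instead of one Python-level char-by-char scan tracking paren depth and cutting at depth-0 bars, B splits the string on every bar with str.split and then merges adjacent pieces back together while the running parenthesis balance of the accumulated piece is nonzero (a bar is top-level iff the balance of everything before it is 0).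
import Mathlib
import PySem

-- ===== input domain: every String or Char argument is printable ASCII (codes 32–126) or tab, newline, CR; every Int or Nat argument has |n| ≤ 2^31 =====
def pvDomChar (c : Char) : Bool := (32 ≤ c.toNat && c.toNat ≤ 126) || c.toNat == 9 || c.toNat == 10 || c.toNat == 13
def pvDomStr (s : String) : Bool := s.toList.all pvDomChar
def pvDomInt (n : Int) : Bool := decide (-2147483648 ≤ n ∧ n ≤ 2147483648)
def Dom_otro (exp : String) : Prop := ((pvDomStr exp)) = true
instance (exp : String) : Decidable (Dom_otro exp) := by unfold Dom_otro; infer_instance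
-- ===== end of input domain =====

-- B replaces A's single char-by-char depth-tracking scan (cut at depth-0 bars) by: split the
-- string on every bar with str.split, then merge adjacent pieces back while the running
-- parenthesis balance of the accumulated piece is nonzero (measured faster in a timing run).

-- ===== PORT A =====
-- helper delamba of A
def delambaP (l : List Char) : String := if l = ['λ'] then "" else String.ofList l

-- A's loop body: state (lista, start, nivel, cont)
def stepA (cs : List Char) (s : List String × Int × Int × Int) (c : Char) :
    List String × Int × Int × Int :=
  let lista := s.1; let start := s.2.1; let nivel := s.2.2.1; let cont := s.2.2.2
  let nivel := if c = '(' then nivel + 1 else nivel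
  let nivel := if c = ')' then nivel - 1 else nivel
  if c = '|' then
    if nivel = 0 then
      (lista ++ [delambaP (PySem.List.slice cs (some start) (some cont))], cont + 1, nivel, cont + 1)
    else (lista, start, nivel, cont + 1)
  else (lista, start, nivel, cont + 1)

def otro (exp : String) : List String :=
  let cs := exp.toList
  let st := cs.foldl (stepA cs) ([], 0, 0, 0)
  st.1 ++ [delambaP (PySem.List.slice cs (some st.2.1) none)]

-- ===== PORT B =====
-- p.count("(") - p.count(")")  (PySem.Chars.count = str.count, on the char list)
def balC (l : List Char) : Int :=
  (PySem.Chars.count l ['('] : Int) - (PySem.Chars.count l [')'] : Int)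

-- B's loop body over the split pieces: state (res, acc, bal)
def stepB (s : List String × List Char × Int) (p : List Char) : List String × List Char × Int :=
  let res := s.1; let acc := s.2.1; let bal := s.2.2
  if bal = 0 then
    (res ++ [if acc = ['λ'] then "" else String.ofList acc], p, balC p)
  else
    (res, acc ++ '|' :: p, bal + balC p)

def otro_alt (exp : String) : List String :=
  let partes := PySem.Chars.splitOn exp.toList ['|']  -- exp.split("|"); never empty
  let a0 := partes.headD []                           -- partes[0]
  let st := partes.tail.foldl stepB ([], a0, balC a0)
  st.1 ++ [if st.2.1 = ['λ'] then "" else String.ofList st.2.1]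

-- ===== PRECONDITION & SPEC =====
def Spec_otro (exp : String) (out : List String) : Prop := out = otro_alt exp
instance (exp : String) (out : List String) : Decidable (Spec_otro exp out) := by unfold Spec_otro; infer_instance

-- ===== CLAIM (what is proved, stated in full; the proofs are below) =====
def Claim_equal_otro : Prop := ∀ (exp : String), Dom_otro exp → Spec_otro exp (otro exp)

-- ===== LEMMAS AND PROOFS =====

-- reference splitter both ports are reduced to
def refSplit : List Char → List Char → List (List Char)
  | [], acc => [acc]
  | c :: r, acc =>
    if c = '|' then
      if balC acc = 0 then acc :: refSplit r [] else refSplit r (acc ++ [c])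
    else refSplit r (acc ++ [c])

-- structural description of str.split("|") : (first piece, remaining pieces)
def sb : List Char → List Char × List (List Char)
  | [] => ([], [])
  | c :: r => if c = '|' then ([], (sb r).1 :: (sb r).2) else (c :: (sb r).1, (sb r).2)

-- str.count of a single character is List.count
lemma count_go_singleton (ch : Char) :
    ∀ (fuel : Nat) (l : List Char) (acc : Nat), l.length ≤ fuel →
      PySem.Chars.count.go [ch] fuel l acc = acc + l.count ch := by
  intro fuel
  induction fuel with
  | zero =>
    intro l acc h
    cases l with
    | nil => simp [PySem.Chars.count.go]
    | cons c r => simp at h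
  | succ f ih =>
    intro l acc h
    cases l with
    | nil => simp [PySem.Chars.count.go]
    | cons c r =>
      by_cases hc : ch = c
      · subst hc
        simp only [PySem.Chars.count.go, List.isPrefixOf, BEq.rfl, Bool.true_and,
          if_pos, List.length_cons, List.drop_succ_cons, List.length_nil, List.drop_zero]
        rw [ih r (acc + 1) (by simpa using h)]
        simp
        omega
      · have hpre : List.isPrefixOf [ch] (c :: r) = false := by
          simp [List.isPrefixOf, hc]
        simp only [PySem.Chars.count.go, hpre]
        rw [ih r acc (by simpa using h)]
        simp [Ne.symm hc]

lemma count_singleton (l : List Char) (ch : Char) :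
    PySem.Chars.count l [ch] = l.count ch := by
  have h := count_go_singleton ch l.length l 0 le_rfl
  simp only [PySem.Chars.count, List.isEmpty_cons]
  simpa using h

lemma balC_eq (l : List Char) :
    balC l = (l.count '(' : Int) - (l.count ')' : Int) := by
  simp [balC, count_singleton]

lemma balC_nil : balC [] = 0 := by decide

lemma balC_append (x y : List Char) : balC (x ++ y) = balC x + balC y := by
  simp [balC_eq, List.count_append]; ring

lemma balC_bar : balC ['|'] = 0 := by decide

-- characterisation of PySem's fueled split for the one-char separator '|'
lemma split_go_bar :
    ∀ (fuel : Nat) (l cur : List Char) (acc : List (List Char)), l.length ≤ fuel →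
      PySem.Chars.splitOn.go ['|'] fuel l cur acc =
        acc.reverse ++ (cur.reverse ++ (sb l).1) :: (sb l).2 := by
  intro fuel
  induction fuel with
  | zero =>
    intro l cur acc h
    cases l with
    | nil => simp [PySem.Chars.splitOn.go, sb]
    | cons c r => simp at h
  | succ f ih =>
    intro l cur acc h
    cases l with
    | nil => simp [PySem.Chars.splitOn.go, sb]
    | cons c r =>
      by_cases hc : c = '|'
      · subst hc
        have hpre : List.isPrefixOf ['|'] ('|' :: r) = true := by
          simp [List.isPrefixOf]
        simp only [PySem.Chars.splitOn.go, hpre, if_pos, List.length_cons,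
          List.drop_succ_cons, List.length_nil, List.drop_zero]
        rw [ih r [] (cur.reverse :: acc) (by simpa using h)]
        simp [sb]
      · have hpre : List.isPrefixOf ['|'] (c :: r) = false := by
          simp [List.isPrefixOf, Ne.symm hc]
        simp only [PySem.Chars.splitOn.go, hpre]
        rw [ih r (c :: cur) acc (by simpa using h)]
        simp [sb, hc]

lemma splitOn_bar (l : List Char) :
    PySem.Chars.splitOn l ['|'] = (sb l).1 :: (sb l).2 := by
  have h := split_go_bar (l.length + 1) l [] [] (by omega)
  simp only [PySem.Chars.splitOn]
  rw [h]; simp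

-- B's fold over the split pieces computes refSplit
lemma loopB :
    ∀ (cs : List Char) (acc : List Char) (res : List String),
      (let st := ((sb cs).2).foldl stepB (res, acc ++ (sb cs).1, balC (acc ++ (sb cs).1))
       st.1 ++ [if st.2.1 = ['λ'] then "" else String.ofList st.2.1])
      = res ++ (refSplit cs acc).map delambaP := by
  intro cs
  induction cs with
  | nil =>
    intro acc res
    simp [sb, refSplit, delambaP]
  | cons c r ih =>
    intro acc res
    by_cases hc : c = '|'
    · subst hc
      simp only [sb, if_pos, List.append_nil, List.foldl_cons]
      by_cases hb : balC acc = 0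
      · have hstep : stepB (res, acc, balC acc) (sb r).1 =
            (res ++ [if acc = ['λ'] then "" else String.ofList acc], (sb r).1, balC (sb r).1) := by
          simp [stepB, hb]
        rw [hstep]
        have := ih [] (res ++ [if acc = ['λ'] then "" else String.ofList acc])
        simp only [List.nil_append] at this
        rw [this]
        simp [refSplit, hb, delambaP]
      · have hstep : stepB (res, acc, balC acc) (sb r).1 =
            (res, acc ++ '|' :: (sb r).1, balC acc + balC (sb r).1) := by
          simp [stepB, hb]
        rw [hstep]
        have hlist : acc ++ '|' :: (sb r).1 = (acc ++ ['|']) ++ (sb r).1 := by simp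
        have hbal : balC acc + balC (sb r).1 = balC ((acc ++ ['|']) ++ (sb r).1) := by
          rw [balC_append, balC_append, balC_bar]; ring
        rw [hlist, hbal, ih (acc ++ ['|']) res]
        simp [refSplit, hb]
    · simp only [sb, if_neg hc]
      have hlist : acc ++ c :: (sb r).1 = (acc ++ [c]) ++ (sb r).1 := by simp
      rw [hlist, ih (acc ++ [c]) res]
      simp [refSplit, hc]


-- A's char-by-char fold computes refSplit too: the carried nivel is the paren balance
-- of the characters consumed since the last cut, and the slices are exactly those characters.
lemma loopA (cs : List Char) :
    ∀ (rest pre : List Char) (lista : List String) (st : Nat) (nivel : Int),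
      cs = pre ++ rest → st ≤ pre.length → nivel = balC (pre.drop st) →
      (let s := rest.foldl (stepA cs) (lista, ((st : Nat) : Int), nivel, ((pre.length : Nat) : Int))
       s.1 ++ [delambaP (PySem.List.slice cs (some s.2.1) none)])
      = lista ++ (refSplit rest (pre.drop st)).map delambaP := by
  intro rest
  induction rest with
  | nil =>
    intro pre lista st nivel hcs hst hn
    simp only [List.foldl_nil]
    rw [PySem.List.slice_from_natCast]
    subst hcs
    simp [refSplit]
  | cons c r ih =>
    intro pre lista st nivel hcs hst hn
    have hdrop : (pre ++ [c]).drop st = pre.drop st ++ [c] :=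
      List.drop_append_of_le_length hst
    have hlen : ((pre ++ [c]).length : Int) = (pre.length : Int) + 1 := by
      simp
    have hcs' : cs = (pre ++ [c]) ++ r := by simp [hcs]
    simp only [List.foldl_cons]
    by_cases hc : c = '|'
    · subst hc
      by_cases hn0 : nivel = 0
      · have hstep : stepA cs (lista, ((st : Nat) : Int), nivel, ((pre.length : Nat) : Int)) '|' =
            (lista ++ [delambaP (PySem.List.slice cs (some ((st : Nat) : Int)) (some ((pre.length : Nat) : Int)))],
             ((pre.length : Nat) : Int) + 1, nivel, ((pre.length : Nat) : Int) + 1) := by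
          simp [stepA, hn0]
        rw [hstep]
        have hslice : PySem.List.slice cs (some ((st : Nat) : Int)) (some ((pre.length : Nat) : Int))
            = pre.drop st := by
          rw [PySem.List.slice_natCast, hcs, List.drop_append_of_le_length hst]
          have hl : (pre.drop st).length = pre.length - st := by simp
          rw [List.take_append_of_le_length (le_of_eq hl.symm) ]
          exact List.take_of_length_le (le_of_eq hl)
        have harg1 : ((pre.length : Nat) : Int) + 1 = (((pre ++ ['|']).length : Nat) : Int) := by
          simp
        rw [hslice, harg1]
        have := ih (pre ++ ['|']) (lista ++ [delambaP (pre.drop st)]) (pre ++ ['|']).length nivel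
          hcs' le_rfl (by simp [hn0, balC_nil])
        rw [this]
        have hn' : balC (pre.drop st) = 0 := by rw [← hn]; exact hn0
        simp [refSplit, hn']
      · have hstep : stepA cs (lista, ((st : Nat) : Int), nivel, ((pre.length : Nat) : Int)) '|' =
            (lista, ((st : Nat) : Int), nivel, ((pre.length : Nat) : Int) + 1) := by
          simp [stepA, hn0]
        rw [hstep]
        have harg : ((pre.length : Nat) : Int) + 1 = (((pre ++ ['|']).length : Nat) : Int) := by
          simp
        rw [harg]
        have := ih (pre ++ ['|']) lista st nivel hcs'
          (by simp; omega) (by rw [hdrop, balC_append, balC_bar, ← hn]; ring)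
        rw [this, hdrop]
        have hn' : ¬ balC (pre.drop st) = 0 := by rw [← hn]; exact hn0
        simp [refSplit, hn']
    · have hstep : stepA cs (lista, ((st : Nat) : Int), nivel, ((pre.length : Nat) : Int)) c =
          (lista, ((st : Nat) : Int),
           (if c = '(' then nivel + 1 else if c = ')' then nivel - 1 else nivel),
           ((pre.length : Nat) : Int) + 1) := by
        by_cases h1 : c = '('
        · simp [stepA, h1, hc]
        · by_cases h2 : c = ')'
          · simp [stepA, h1, h2, hc]
          · simp [stepA, h1, h2, hc]
      rw [hstep]
      have harg : ((pre.length : Nat) : Int) + 1 = (((pre ++ [c]).length : Nat) : Int) := by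
        simp
      rw [harg]
      have hbal : (if c = '(' then nivel + 1 else if c = ')' then nivel - 1 else nivel)
          = balC ((pre ++ [c]).drop st) := by
        rw [hdrop, balC_append, ← hn, balC_eq]
        by_cases h1 : c = '('
        · simp [h1]
        · by_cases h2 : c = ')'
          · simp only [h1, h2, if_true, reduceIte]
            simp
            ring
          · simp [h1, h2]
      have := ih (pre ++ [c]) lista st _ hcs' (by simp; omega) hbal
      rw [this, hdrop]
      simp [refSplit, hc]

-- ===== VERDICT (by name: the statement is the Claim_ definition above) =====
theorem otro_spec : Claim_equal_otro := by
  intro exp _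
  show otro exp = otro_alt exp
  unfold otro otro_alt
  have hA := loopA exp.toList exp.toList [] [] 0 0 (by simp) (by simp) (by simp [balC_nil])
  simp only [Nat.cast_zero, List.length_nil, List.drop_zero] at hA
  have hB := loopB exp.toList [] []
  simp only [List.nil_append] at hB
  rw [splitOn_bar]
  simp only [List.headD_cons, List.tail_cons]
  rw [hA, hB]
  simp
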